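-- pv_equiv track=rewrite | github.com/aumrawal/GDL_Cars | models/irreps.py | count_parameters_self
-- ===== SOURCE A (Python) =====
-- from typing import List, Tuple
--
-- FeatureType = List[Tuple[int, int]]
--
-- def count_parameters_self(ftype_in: FeatureType, ftype_out: FeatureType) -> int:
--     """Count total learnable parameters for K_self."""
--     total = 0
--     for (n_out, m_out) in ftype_out:
--         for (n_in, m_in) in ftype_in:
--             if n_in == n_out:
--                 n_basis = 1 if n_in == 0 else 2
--                 total += n_basis * m_in * m_out
--     return total
-- ===== SOURCE B (Python) =====
-- def count_parameters_self(ftype_in, ftype_out):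
--     """Count total learnable parameters for K_self."""
--     sums = {}
--     for (n, m) in ftype_in:
--         sums[n] = sums.get(n, 0) + m
--     total = 0
--     for (n, m) in ftype_out:
--         total += (1 if n == 0 else 2) * sums.get(n, 0) * m
--     return total
-- ===== Notes on version B (the rewrite author's own statement) =====
-- stated objective: faster
-- what changed: B replaces A's nested scan of ftype_in per output irrep by a single pass building a dict of summed input multiplicities per degree, then one pass over ftype_out.
import Mathlib
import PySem

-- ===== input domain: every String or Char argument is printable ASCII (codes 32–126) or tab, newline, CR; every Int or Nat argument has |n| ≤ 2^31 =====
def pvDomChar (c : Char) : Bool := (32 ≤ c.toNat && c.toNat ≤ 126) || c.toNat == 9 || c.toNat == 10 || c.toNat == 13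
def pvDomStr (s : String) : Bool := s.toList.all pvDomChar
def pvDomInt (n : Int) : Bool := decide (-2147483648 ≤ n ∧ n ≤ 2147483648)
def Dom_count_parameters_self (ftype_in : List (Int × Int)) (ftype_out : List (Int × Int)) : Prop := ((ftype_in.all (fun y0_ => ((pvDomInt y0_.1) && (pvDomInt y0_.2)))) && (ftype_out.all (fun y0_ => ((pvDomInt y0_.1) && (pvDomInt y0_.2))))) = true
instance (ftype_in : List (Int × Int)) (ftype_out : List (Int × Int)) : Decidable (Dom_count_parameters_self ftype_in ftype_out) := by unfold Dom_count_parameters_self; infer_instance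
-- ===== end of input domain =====

-- B groups input multiplicity sums by degree in one dict pass, then one pass over ftype_out (asymptotically faster than A's nested loops).


-- ===== PORT A =====
def count_parameters_self (ftype_in : List (Int × Int)) (ftype_out : List (Int × Int)) : Int :=
  ftype_out.foldl (fun total p_out =>
    ftype_in.foldl (fun total p_in =>
      if p_in.1 == p_out.1 then
        total + (if p_in.1 == 0 then (1 : Int) else 2) * p_in.2 * p_out.2
      else total) total) 0

-- ===== PORT B =====
def count_parameters_self_alt (ftype_in : List (Int × Int)) (ftype_out : List (Int × Int)) : Int :=
  let sums : PySem.Dict Int Int :=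
    ftype_in.foldl (fun d p => d.insert p.1 (d.getD p.1 0 + p.2)) PySem.Dict.empty
  ftype_out.foldl (fun total p =>
    total + (if p.1 == 0 then (1 : Int) else 2) * sums.getD p.1 0 * p.2) 0

-- ===== PRECONDITION & SPEC =====
def Spec_count_parameters_self (ftype_in : List (Int × Int)) (ftype_out : List (Int × Int)) (out : Int) : Prop := out = count_parameters_self_alt ftype_in ftype_out
instance (ftype_in : List (Int × Int)) (ftype_out : List (Int × Int)) (out : Int) : Decidable (Spec_count_parameters_self ftype_in ftype_out out) := by unfold Spec_count_parameters_self; infer_instance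

-- ===== CLAIM (what is proved, stated in full; the proofs are below) =====
def Claim_equal_count_parameters_self : Prop := ∀ (ftype_in : List (Int × Int)) (ftype_out : List (Int × Int)), Dom_count_parameters_self ftype_in ftype_out → Spec_count_parameters_self ftype_in ftype_out (count_parameters_self ftype_in ftype_out)

-- ===== LEMMAS AND PROOFS =====

-- the grouping dict's entry at n is the sum of the input multiplicities of degree n
theorem getD_sums (l : List (Int × Int)) (d : PySem.Dict Int Int) (n : Int) :
    (l.foldl (fun d p => d.insert p.1 (d.getD p.1 0 + p.2)) d).getD n 0
      = d.getD n 0 + ((l.filter (fun p => p.1 == n)).map (·.2)).sum := by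
  induction l generalizing d with
  | nil => simp
  | cons p l ih =>
    simp only [List.foldl_cons, ih, List.filter_cons]
    by_cases h : p.1 = n
    · simp [h]; ring
    · rw [PySem.Dict.getD_insert]
      simp [Ne.symm h, h]

-- A's inner loop over ftype_in adds basis(n)·(sum of matching m_in)·m_out to the accumulator
theorem inner_loop (l : List (Int × Int)) (t n m : Int) :
    l.foldl (fun total p_in =>
      if p_in.1 == n then
        total + (if p_in.1 == 0 then (1 : Int) else 2) * p_in.2 * m
      else total) t
      = t + (if n == 0 then (1 : Int) else 2) * ((l.filter (fun p => p.1 == n)).map (·.2)).sum * m := by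
  induction l generalizing t with
  | nil => simp
  | cons p l ih =>
    simp only [List.foldl_cons, List.filter_cons]
    by_cases h : p.1 = n
    · simp only [h, beq_self_eq_true, if_true, ih, List.map_cons, List.sum_cons]
      ring
    · have hb : (p.1 == n) = false := by simp [h]
      simp only [hb, Bool.false_eq_true, if_false]
      exact ih t

-- ===== VERDICT (by name: the statement is the Claim_ definition above) =====
theorem count_parameters_self_spec : Claim_equal_count_parameters_self := by
  intro fin fout _
  show count_parameters_self fin fout = count_parameters_self_alt fin fout
  unfold count_parameters_self count_parameters_self_alt
  simp only [inner_loop, getD_sums, PySem.Dict.getD_empty, zero_add]
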